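-- pv_equiv track=rewrite | github.com/joshanashakya/dissertation | workspace/dataset/java-python/GeeksForGeeks/4448/A/2.py | findAltStr
-- ===== SOURCE A (Python) =====
-- SIZE = 26
--
-- def isVowel(ch):
--     if (ch == 'a' or ch == 'e' or
--         ch == 'i' or ch == 'o' or
--         ch == 'u'):
--         return True
--     return False
--
-- def createAltStr(str1, str2, start, l):
--     finalStr = ""
--     i = 0
--     j = start
--
--     # first adding character of vowel/consonant
--     # then adding character of consonant/vowel
--     while j < l:
--         finalStr += str1[i] + str2[j]
--         i += 1
--         j += 1
--     return finalStr
--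
-- def findAltStr(string):
--
--     # hash table to store frequencies
--     # of each character in 'str'
--     char_freq = [0] * SIZE # initilaize all elements
--                            # of char_freq[] to 0
--     nv = 0
--     nc = 0
--     vstr = ""
--     cstr = ""
--     l = len(string)
--
--     for i in range(l):
--         ch = string[i]
--
--         # count vowels
--         if isVowel(ch):
--             nv += 1
--
--         # count consonants
--         else:
--             nc += 1
--
--         # update frequency of 'ch' in
--         # char_freq[]
--         char_freq[ord(ch) - 97] += 1
--
--     # no such string can be formed
--     if abs(nv - nc) >= 2:
--         return "no such string"
--
--     # form the vowel string 'vstr' and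
--     # consonant string 'cstr' which contains
--     # characters in lexicographical order
--     for i in range(SIZE):
--         ch = chr(i + 97)
--         for j in range(1, char_freq[i] + 1):
--             if isVowel(ch):
--                 vstr += ch
--             else:
--                 cstr += ch
--
--     # remove first character of vowel string
--     # then create alternate string with
--     # cstr[0...nc-1] and vstr[1...nv-1]
--     if nv > nc:
--         return vstr[0] + createAltStr(cstr,
--                                       vstr, 1, nv)
--
--     # remove first character of consonant string
--     # then create alternate string with
--     # vstr[0...nv-1] and cstr[1...nc-1]
--     if nc > nv:
--         return cstr[0] + createAltStr(vstr,
--                                       cstr, 1, nc)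
--
--     # if both vowel and consonant
--     # strings are of equal length
--     # start creating string with consonant
--     if cstr[0] < vstr[0]:
--         return createAltStr(cstr, vstr, 0, nv)
--
--     # start creating string with vowel
--     return createAltStr(vstr, cstr, 0, nc)
-- ===== SOURCE B (Python) =====
-- def findAltStr(string):
--     s = sorted(string)
--     vowels = set('aeiou')
--     vstr = [c for c in s if c in vowels]
--     cstr = [c for c in s if c not in vowels]
--     nv, nc = len(vstr), len(cstr)
--     if abs(nv - nc) >= 2:
--         return "no such string"
--     if nv > nc:
--         return vstr[0] + ''.join(c + v for c, v in zip(cstr, vstr[1:]))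
--     if nc > nv:
--         return cstr[0] + ''.join(v + c for v, c in zip(vstr, cstr[1:]))
--     if cstr[0] < vstr[0]:
--         return ''.join(c + v for c, v in zip(cstr, vstr))
--     return ''.join(v + c for v, c in zip(vstr, cstr))
-- ===== Notes on version B (the rewrite author's own statement) =====
-- stated objective: simpler
-- what changed: B replaces A's 26-bucket counting pass plus index-driven while-loop string builder with sorted() followed by a one-pass vowel/consonant partition and zip-based joins; Pre_ restricts to the natural domain (nonempty, lowercase a-z strings): outside it A raises IndexError on the empty string and on most characters, and on characters with codes 71-96 A's negative index ord(ch)-97 silently folds them into unrelated lowercase buckets.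
-- outside the precondition, e.g. on findAltStr('Hi'): A returns 'bi', B returns 'Hi'; on findAltStr('Ha'): A returns 'ab', B returns 'Ha'; on findAltStr('`'): A returns 'z', B returns '`'
import Mathlib
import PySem

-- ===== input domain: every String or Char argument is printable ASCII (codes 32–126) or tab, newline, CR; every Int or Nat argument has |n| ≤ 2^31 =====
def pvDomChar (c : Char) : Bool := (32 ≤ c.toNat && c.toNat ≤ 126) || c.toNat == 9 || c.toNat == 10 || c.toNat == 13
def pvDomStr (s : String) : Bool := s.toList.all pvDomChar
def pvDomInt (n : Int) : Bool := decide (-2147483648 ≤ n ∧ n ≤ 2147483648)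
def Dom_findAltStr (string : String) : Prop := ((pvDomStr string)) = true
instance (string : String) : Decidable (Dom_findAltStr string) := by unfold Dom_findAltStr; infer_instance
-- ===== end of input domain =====

-- B replaces A's 26-bucket counting pass and index-driven while-loop builder by sort + one-pass
-- vowel/consonant partition + zip-based interleaving (objective: simpler; not claimed faster).

-- ===== PORT A =====
def isVowel (ch : Char) : Bool :=
  if ch == 'a' || ch == 'e' || ch == 'i' || ch == 'o' || ch == 'u' then true else false

-- the while-loop of createAltStr: fuel = number of remaining iterations (l - j)
def altLoopA (str1 str2 : List Char) : Nat → Int → Int → List Char → List Char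
  | 0, _, _, acc => acc
  | n+1, i, j, acc =>
      altLoopA str1 str2 n (i+1) (j+1)
        (acc ++ [PySem.List.pyGetD str1 i ' ', PySem.List.pyGetD str2 j ' '])

def createAltStr (str1 str2 : List Char) (start l : Int) : List Char :=
  altLoopA str1 str2 (l - start).toNat 0 start []

-- body of A's first loop: state (nv, nc, char_freq)
def stepA (st : Int × Int × List Int) (ch : Char) : Int × Int × List Int :=
  let nv := if isVowel ch then st.1 + 1 else st.1
  let nc := if isVowel ch then st.2.1 else st.2.1 + 1
  let idx : Int := (ch.toNat : Int) - 97
  let freq := PySem.List.pySetD st.2.2 idx (PySem.List.pyGetD st.2.2 idx 0 + 1)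
  (nv, nc, freq)

-- A's inner loop 'for j in range(1, char_freq[i]+1)': state (vstr, cstr)
def innerA (ch : Char) (m : Int) (acc : List Char × List Char) : List Char × List Char :=
  (PySem.List.pyRange 1 (m + 1) 1).foldl
    (fun st _ => if isVowel ch then (st.1 ++ [ch], st.2) else (st.1, st.2 ++ [ch])) acc

def findAltStr (string : String) : String :=
  let chars := string.toList
  let l : Int := PySem.Str.len string
  let st := (PySem.List.pyRange 0 l 1).foldl
    (fun st i => stepA st (PySem.List.pyGetD chars i ' ')) (0, 0, List.replicate 26 (0:Int))
  let nv := st.1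
  let nc := st.2.1
  let freq := st.2.2
  if 2 ≤ |nv - nc| then "no such string"
  else
    let vc := (PySem.List.pyRange 0 26 1).foldl
      (fun acc i => innerA (Char.ofNat (i + 97).toNat) (PySem.List.pyGetD freq i 0) acc) ([], [])
    let vstr := vc.1
    let cstr := vc.2
    if nv > nc then String.ofList (PySem.List.pyGetD vstr 0 ' ' :: createAltStr cstr vstr 1 nv)
    else if nc > nv then String.ofList (PySem.List.pyGetD cstr 0 ' ' :: createAltStr vstr cstr 1 nc)
    else if PySem.List.pyGetD cstr 0 ' ' < PySem.List.pyGetD vstr 0 ' ' then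
      String.ofList (createAltStr cstr vstr 0 nv)
    else String.ofList (createAltStr vstr cstr 0 nc)

-- ===== PORT B =====
def pyVowels : PySem.Set Char := PySem.Set.ofList "aeiou".toList

def pairJoin (xs ys : List Char) : List Char := (xs.zip ys).flatMap (fun p => [p.1, p.2])

def findAltStr_alt (string : String) : String :=
  let s := PySem.List.sorted string.toList (fun c => c) false
  let vstr := s.filter (fun c => PySem.Set.contains pyVowels c)
  let cstr := s.filter (fun c => !PySem.Set.contains pyVowels c)
  let nv : Int := vstr.length
  let nc : Int := cstr.length
  if 2 ≤ |nv - nc| then "no such string"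
  else if nv > nc then
    String.ofList (PySem.List.pyGetD vstr 0 ' ' :: pairJoin cstr (PySem.List.slice vstr (some 1) none))
  else if nc > nv then
    String.ofList (PySem.List.pyGetD cstr 0 ' ' :: pairJoin vstr (PySem.List.slice cstr (some 1) none))
  else if PySem.List.pyGetD cstr 0 ' ' < PySem.List.pyGetD vstr 0 ' ' then
    String.ofList (pairJoin cstr vstr)
  else String.ofList (pairJoin vstr cstr)

-- ===== PRECONDITION & SPEC =====
-- Pre_ restricts to the function's natural domain, nonempty strings of lowercase letters a-z:
-- outside it A raises IndexError (the empty string, characters with code below 71 or above 122),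
-- and on the remaining characters (codes 71-96) A's negative list index ord(ch)-97 folds them
-- into unrelated lowercase buckets, a value no caller would specify (see cites in claim.json).
def Pre_findAltStr (string : String) : Prop :=
  (!string.toList.isEmpty
    && string.toList.all (fun c => 97 ≤ c.toNat && c.toNat ≤ 122)) = true
instance (string : String) : Decidable (Pre_findAltStr string) := by
  unfold Pre_findAltStr; infer_instance

def pvWitness_findAltStr : String := "ab"

def Spec_findAltStr (string : String) (out : String) : Prop := out = findAltStr_alt string
instance (string : String) (out : String) : Decidable (Spec_findAltStr string out) := by
  unfold Spec_findAltStr; infer_instance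

-- ===== CLAIM (what is proved, stated in full; the proofs are below) =====
def Claim_equal_findAltStr : Prop :=
  ∀ (string : String), Dom_findAltStr string → Pre_findAltStr string →
    Spec_findAltStr string (findAltStr string)

-- ===== LEMMAS AND PROOFS =====
def chB (k : Nat) : Char := Char.ofNat (k + 97)
def G (l : List Char) (k : Nat) : List Char := List.replicate (l.count (chB k)) (chB k)
def F (l : List Char) : List Char := (List.range 26).flatMap (G l)

theorem toNat_chB (k : Nat) (hk : k < 26) : (chB k).toNat = k + 97 := by
  have h : Nat.isValidChar (k + 97) := Or.inl (by omega)
  rw [chB, Char.toNat_ofNat, if_pos h]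

theorem chB_toNat (c : Char) (h : 97 ≤ c.toNat) : chB (c.toNat - 97) = c := by
  have : c.toNat - 97 + 97 = c.toNat := by omega
  rw [chB, this, Char.ofNat_toNat]

theorem vow_eq (c : Char) : PySem.Set.contains pyVowels c = isVowel c := by
  by_cases ha : c = 'a'; · subst ha; decide
  by_cases he : c = 'e'; · subst he; decide
  by_cases hi : c = 'i'; · subst hi; decide
  by_cases ho : c = 'o'; · subst ho; decide
  by_cases hu : c = 'u'; · subst hu; decide
  have h1 : isVowel c = false := by simp [isVowel, ha, he, hi, ho, hu]
  have h2 : PySem.Set.contains pyVowels c = false := by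
    have hv : pyVowels = ['a', 'e', 'i', 'o', 'u'] := by decide
    simp [hv, PySem.Set.contains, ha, he, hi, ho, hu]
  rw [h1, h2]

theorem innerA_eq (ch : Char) (n : Nat) (acc : List Char × List Char) :
    innerA ch (n : Int) acc =
      if isVowel ch then (acc.1 ++ List.replicate n ch, acc.2)
      else (acc.1, acc.2 ++ List.replicate n ch) := by
  induction n with
  | zero =>
    unfold innerA
    rw [show ((0:Nat):Int) + 1 = 1 by norm_num, PySem.List.pyRange_one_eq_nil le_rfl]
    cases isVowel ch <;> simp
  | succ m ih =>
    unfold innerA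
    rw [show (((m+1:Nat)):Int) + 1 = (((m:Nat):Int) + 1) + 1 by push_cast; ring]
    rw [PySem.List.pyRange_one_succ_right (by exact_mod_cast Nat.succ_le_succ (Nat.zero_le m))]
    rw [List.foldl_append]
    rw [show (PySem.List.pyRange 1 ((m:Int) + 1) 1).foldl
        (fun (st : List Char × List Char) _ =>
          if isVowel ch then (st.1 ++ [ch], st.2) else (st.1, st.2 ++ [ch])) acc
        = innerA ch (m : Int) acc from rfl, ih]
    cases hv : isVowel ch
    · simp only [Bool.false_eq_true, reduceIte, List.foldl_cons, List.foldl_nil]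
      rw [List.replicate_succ', ← List.append_assoc]
    · simp only [reduceIte, List.foldl_cons, List.foldl_nil]
      rw [List.replicate_succ', ← List.append_assoc]

theorem set_map_range (g : Nat → Int) (n k : Nat) (hk : k < n) (v : Int) :
    ((List.range n).map g).set k v = (List.range n).map (fun j => if j = k then v else g j) := by
  apply List.ext_getElem
  · simp
  · intro i h1 h2
    simp only [List.getElem_set, List.getElem_map, List.getElem_range]
    split_ifs <;> first | rfl | omega

theorem loopA_inv (l : List Char) (h : ∀ c ∈ l, 97 ≤ c.toNat ∧ c.toNat ≤ 122)
    (a b : Int) (g : Nat → Int) :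
    l.foldl stepA (a, b, (List.range 26).map g)
      = (a + l.countP isVowel, b + l.countP (fun c => !isVowel c),
         (List.range 26).map (fun k => g k + l.count (chB k))) := by
  induction l generalizing a b g with
  | nil => simp
  | cons x xs ih =>
    obtain ⟨hx1, hx2⟩ := h x (by simp)
    have hall : ∀ c ∈ xs, 97 ≤ c.toNat ∧ c.toNat ≤ 122 := fun c hc => h c (by simp [hc])
    have hk26 : x.toNat - 97 < 26 := by omega
    have hchB : chB (x.toNat - 97) = x := chB_toNat x hx1
    have hidx : ((x.toNat : Int) - 97) = ((x.toNat - 97 : Nat) : Int) := by push_cast [hx1]; ring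
    have hget : PySem.List.pyGetD ((List.range 26).map g) (((x.toNat - 97 : Nat)) : Int) 0
        = g (x.toNat - 97) := by
      rw [PySem.List.pyGetD_natCast]
      rw [List.getD_eq_getElem _ _ (by simpa using hk26)]
      simp
    have hset : PySem.List.pySetD ((List.range 26).map g) (((x.toNat - 97 : Nat)) : Int)
        (g (x.toNat - 97) + 1)
        = (List.range 26).map (fun j => if j = x.toNat - 97 then g (x.toNat - 97) + 1 else g j) := by
      rw [PySem.List.pySetD_natCast]
      exact set_map_range g 26 (x.toNat - 97) hk26 _
    simp only [List.foldl_cons]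
    rw [show stepA (a, b, (List.range 26).map g) x
        = ((if isVowel x then a + 1 else a), (if isVowel x then b else b + 1),
           (List.range 26).map (fun j => if j = x.toNat - 97 then g (x.toNat - 97) + 1 else g j))
        from by simp only [stepA, hidx, hget, hset]]
    rw [ih hall]
    refine Prod.ext ?_ (Prod.ext ?_ ?_)
    · simp only [List.countP_cons]
      cases isVowel x <;> simp <;> omega
    · simp only [List.countP_cons]
      cases isVowel x <;> simp <;> omega
    · simp only
      apply List.map_congr_left
      intro j hj
      have hj26 : j < 26 := List.mem_range.mp hj
      by_cases hjk : j = x.toNat - 97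
      · subst hjk
        rw [if_pos rfl, hchB, List.count_cons_self]
        push_cast; ring
      · have hne : chB j ≠ x := by
          intro hh
          apply hjk
          have := congrArg Char.toNat hh
          rw [toNat_chB j hj26] at this
          omega
        rw [if_neg hjk, List.count_cons_of_ne (fun hh => hne hh.symm)]

theorem split_fold (l : List Char) :
    ∀ (ks : List Nat), (∀ k ∈ ks, k < 26) → ∀ (v c : List Char),
    (ks.map (Nat.cast : Nat → Int)).foldl
      (fun acc i => innerA (Char.ofNat (i + 97).toNat)
        (PySem.List.pyGetD ((List.range 26).map (fun k => (l.count (chB k) : Int))) i 0) acc)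
      (v, c)
      = (v ++ (ks.flatMap (G l)).filter isVowel,
         c ++ (ks.flatMap (G l)).filter (fun x => !isVowel x)) := by
  intro ks
  induction ks with
  | nil => intro _ v c; simp
  | cons k ks ih =>
    intro hks v c
    have hk26 : k < 26 := hks k (List.mem_cons_self ..)
    have e2 : PySem.List.pyGetD ((List.range 26).map (fun k => (l.count (chB k) : Int)))
        ((k : Nat) : Int) 0 = ((l.count (chB k) : Nat) : Int) := by
      rw [PySem.List.pyGetD_natCast]
      rw [List.getD_eq_getElem _ _ (by simpa using hk26)]
      simp
    have hhead : innerA (Char.ofNat ((((k : Nat) : Int)) + 97).toNat)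
          (PySem.List.pyGetD ((List.range 26).map (fun k => (l.count (chB k) : Int)))
            ((k : Nat) : Int) 0) (v, c)
        = if isVowel (chB k)
            then (v ++ List.replicate (l.count (chB k)) (chB k), c)
            else (v, c ++ List.replicate (l.count (chB k)) (chB k)) := by
      rw [show (((k : Int)) + 97).toNat = k + 97 by omega, e2]
      exact innerA_eq (chB k) (l.count (chB k)) (v, c)
    rw [List.map_cons, List.foldl_cons, hhead]
    have ih' := ih (fun k hk => hks k (List.mem_cons_of_mem _ hk))
    cases hv : isVowel (chB k)
    · rw [if_neg (by simp [hv]), ih']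
      simp [G, List.filter_replicate, hv, List.append_assoc]
    · rw [if_pos (by simp [hv]), ih']
      simp [G, List.filter_replicate, hv, List.append_assoc]

theorem count_flatMap_chars (g : Nat → List Char) (c : Char) (ks : List Nat) :
    ((ks.flatMap g).count c) = (ks.map (fun k => (g k).count c)).sum := by
  induction ks with
  | nil => simp
  | cons k ks ih => simp [List.count_append, ih]

theorem sum_single (f : Nat → Nat) (k0 : Nat) :
    ∀ n, k0 < n → (∀ j, j < n → j ≠ k0 → f j = 0) →
      ((List.range n).map f).sum = f k0 := by
  intro n
  induction n with
  | zero => omega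
  | succ m ih =>
    intro hk hz
    rw [List.range_succ, List.map_append, List.sum_append]
    simp only [List.map_cons, List.map_nil, List.sum_cons, List.sum_nil]
    by_cases hm : k0 = m
    · subst hm
      have hzero : ((List.range k0).map f).sum = 0 := by
        apply List.sum_eq_zero
        intro x hx
        simp only [List.mem_map, List.mem_range] at hx
        obtain ⟨j, hj, rfl⟩ := hx
        exact hz j (by omega) (by omega)
      omega
    · rw [ih (by omega) (fun j hj hne => hz j (by omega) hne),
        hz m (by omega) (fun hh => hm hh.symm)]
      omega

theorem F_count (l : List Char) (h : ∀ c ∈ l, 97 ≤ c.toNat ∧ c.toNat ≤ 122) (c : Char) :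
    (F l).count c = l.count c := by
  rw [F, count_flatMap_chars]
  have hterm : (fun k => (G l k).count c)
      = (fun k => if chB k = c then l.count (chB k) else 0) := by
    funext k; simp [G, List.count_replicate]
  rw [hterm]
  by_cases hc : 97 ≤ c.toNat ∧ c.toNat ≤ 122
  · have hk0 : c.toNat - 97 < 26 := by omega
    have hch : chB (c.toNat - 97) = c := chB_toNat c hc.1
    rw [sum_single (fun k => if chB k = c then l.count (chB k) else 0) (c.toNat - 97) 26 hk0 ?_]
    · show (if chB (c.toNat - 97) = c then l.count (chB (c.toNat - 97)) else 0) = l.count c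
      rw [if_pos hch, hch]
    · intro j hj hne
      show (if chB j = c then l.count (chB j) else 0) = 0
      rw [if_neg]
      intro hh
      apply hne
      have := congrArg Char.toNat hh
      rw [toNat_chB j hj] at this
      omega
  · have hnm : c ∉ l := fun hc' => hc (h c hc')
    rw [List.count_eq_zero.mpr hnm]
    apply List.sum_eq_zero
    intro x hx
    simp only [List.mem_map, List.mem_range] at hx
    obtain ⟨j, hj, rfl⟩ := hx
    show (if chB j = c then l.count (chB j) else 0) = 0
    rw [if_neg]
    intro hh
    apply hc
    rw [← hh, toNat_chB j hj]
    omega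

theorem F_perm (l : List Char) (h : ∀ c ∈ l, 97 ≤ c.toNat ∧ c.toNat ≤ 122) :
    (F l).Perm l := by
  rw [List.perm_iff_count]
  intro c
  exact F_count l h c

theorem F_pairwise_aux (l : List Char) :
    ∀ (n a : Nat), a + n ≤ 26 → ((List.range' a n).flatMap (G l)).Pairwise (· ≤ ·) := by
  intro n
  induction n with
  | zero => intro a _; simp
  | succ m ih =>
    intro a ha
    rw [List.range'_succ, List.flatMap_cons, List.pairwise_append]
    refine ⟨?_, ih (a + 1) (by omega), ?_⟩
    · simp [G, List.pairwise_replicate]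
    · intro x hx y hy
      have hxe : x = chB a := List.eq_of_mem_replicate (by simpa [G] using hx)
      obtain ⟨k, hk, hyk⟩ := List.mem_flatMap.mp hy
      have hye : y = chB k := List.eq_of_mem_replicate (by simpa [G] using hyk)
      have hkb : a + 1 ≤ k ∧ k < a + 1 + m := by
        have := List.mem_range'_1.mp hk
        omega
      subst hxe hye
      have hiff : chB a ≤ chB k ↔ (chB a).toNat ≤ (chB k).toNat := Char.le_def
      refine hiff.mpr ?_
      rw [toNat_chB a (by omega), toNat_chB k (by omega)]
      omega

theorem F_pairwise (l : List Char) : (F l).Pairwise (· ≤ ·) := by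
  have := F_pairwise_aux l 26 0 (by omega)
  simpa [F, List.range_eq_range'] using this

theorem sorted_eq_F (l : List Char) (h : ∀ c ∈ l, 97 ≤ c.toNat ∧ c.toNat ≤ 122) :
    PySem.List.sorted l (fun c => c) false = F l := by
  apply PySem.List.sorted_id_eq_of_perm_of_pairwise <;>
    first
      | exact F_perm l h
      | exact F_pairwise l

theorem pairJoin_cons (x y : Char) (xs ys : List Char) :
    pairJoin (x :: xs) (y :: ys) = x :: y :: pairJoin xs ys := by
  simp [pairJoin]

theorem altLoopA_pairJoin (s1 s2 : List Char) :
    ∀ (fuel : Nat) (i j : Nat) (acc : List Char),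
      i + fuel ≤ s1.length → j + fuel ≤ s2.length →
      altLoopA s1 s2 fuel (i : Int) (j : Int) acc
        = acc ++ pairJoin ((s1.drop i).take fuel) ((s2.drop j).take fuel) := by
  intro fuel
  induction fuel with
  | zero => intro i j acc _ _; simp [altLoopA, pairJoin]
  | succ m ih =>
    intro i j acc h1 h2
    have hi : i < s1.length := by omega
    have hj : j < s2.length := by omega
    rw [altLoopA]
    have g1 : PySem.List.pyGetD s1 (i : Int) ' ' = s1[i] := by
      rw [PySem.List.pyGetD_natCast]
      exact List.getD_eq_getElem _ _ hi
    have g2 : PySem.List.pyGetD s2 (j : Int) ' ' = s2[j] := by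
      rw [PySem.List.pyGetD_natCast]
      exact List.getD_eq_getElem _ _ hj
    rw [g1, g2, show (i : Int) + 1 = ((i + 1 : Nat) : Int) by push_cast; ring,
      show (j : Int) + 1 = ((j + 1 : Nat) : Int) by push_cast; ring,
      ih (i + 1) (j + 1) _ (by omega) (by omega)]
    conv_rhs => rw [List.drop_eq_getElem_cons hi, List.drop_eq_getElem_cons hj,
      List.take_succ_cons, List.take_succ_cons, pairJoin_cons]
    rw [List.append_assoc]
    rfl

theorem altLoop_tail (s1 s2 : List Char) (h : s1.length + 1 = s2.length) :
    altLoopA s1 s2 s1.length 0 1 [] = pairJoin s1 s2.tail := by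
  have hh := altLoopA_pairJoin s1 s2 s1.length 0 1 [] (by omega) (by omega)
  rw [show ((0:Nat):Int) = (0:Int) by norm_num, show ((1:Nat):Int) = (1:Int) by norm_num] at hh
  rw [hh, List.drop_zero, List.take_length,
    List.take_of_length_le (by rw [List.length_drop]; omega), List.drop_one, List.nil_append]

theorem altLoop_even (s1 s2 : List Char) (h : s1.length = s2.length) :
    altLoopA s1 s2 s1.length 0 0 [] = pairJoin s1 s2 := by
  have hh := altLoopA_pairJoin s1 s2 s1.length 0 0 [] (by omega) (by omega)
  rw [show ((0:Nat):Int) = (0:Int) by norm_num] at hh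
  rw [hh, List.drop_zero, List.drop_zero, List.take_length,
    List.take_of_length_le (by omega), List.nil_append]

theorem outer_eq (l : List Char) :
    (PySem.List.pyRange 0 26 1).foldl
      (fun acc i => innerA (Char.ofNat (i + 97).toNat)
        (PySem.List.pyGetD ((List.range 26).map (fun k => (l.count (chB k) : Int))) i 0) acc)
      ([], [])
      = ((F l).filter isVowel, (F l).filter (fun x => !isVowel x)) := by
  rw [show PySem.List.pyRange 0 26 1 = (List.range 26).map (Nat.cast : Nat → Int) from by decide]
  rw [split_fold l (List.range 26) (fun k hk => List.mem_range.mp hk) [] []]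
  simp [F]

-- ===== VERDICT (by name: the statement is the Claim_ definition above) =====
theorem findAltStr_spec : Claim_equal_findAltStr := by
  intro s _ hpre
  have hp := hpre
  unfold Pre_findAltStr at hp
  rw [Bool.and_eq_true] at hp
  obtain ⟨h1, h2⟩ := hp
  have hne : s.toList ≠ [] := by simpa using h1
  have hlc' : ∀ c ∈ s.toList, 97 ≤ c.toNat ∧ c.toNat ≤ 122 := by
    rw [List.all_eq_true] at h2
    intro c hc
    have hh := h2 c hc
    rw [Bool.and_eq_true] at hh
    exact ⟨of_decide_eq_true hh.1, of_decide_eq_true hh.2⟩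
  have hlen : PySem.Str.len s = (s.toList.length : Int) := by simp
  have h1 : (PySem.List.pyRange 0 (PySem.Str.len s) 1).foldl
      (fun st i => stepA st (PySem.List.pyGetD s.toList i ' '))
      ((0 : Int), (0 : Int), List.replicate 26 (0 : Int))
      = ((s.toList.countP isVowel : Int), (s.toList.countP (fun c => !isVowel c) : Int),
         (List.range 26).map (fun k => (s.toList.count (chB k) : Int))) := by
    rw [hlen, PySem.List.foldl_pyRange_zero_pyGetD' s.toList ' ' stepA
        ((0 : Int), (0 : Int), List.replicate 26 (0 : Int))]
    rw [show List.replicate 26 (0 : Int) = (List.range 26).map (fun _ => (0 : Int)) from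
      by rw [List.map_const', List.length_range]]
    rw [loopA_inv s.toList hlc' 0 0 (fun _ => (0 : Int))]
    simp
  have hfa : (fun c => PySem.Set.contains pyVowels c) = isVowel := funext vow_eq
  have hfb : (fun c => !PySem.Set.contains pyVowels c) = (fun c => !isVowel c) :=
    funext (fun c => by rw [vow_eq])
  have hV : ((F s.toList).filter isVowel).length = s.toList.countP isVowel := by
    rw [← List.countP_eq_length_filter]
    exact (F_perm s.toList hlc').countP_eq _
  have hC : ((F s.toList).filter (fun x => !isVowel x)).length
      = s.toList.countP (fun c => !isVowel c) := by
    rw [← List.countP_eq_length_filter]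
    exact (F_perm s.toList hlc').countP_eq _
  simp only [Spec_findAltStr, findAltStr, findAltStr_alt]
  rw [h1, outer_eq s.toList, hfa, hfb, sorted_eq_F s.toList hlc', hV, hC]
  simp only [createAltStr]
  set V := (F s.toList).filter isVowel with hVdef
  set C := (F s.toList).filter (fun x => !isVowel x) with hCdef
  set a := s.toList.countP isVowel with hadef
  set b := s.toList.countP (fun c => !isVowel c) with hbdef
  have hVl : V.length = a := hV
  have hCl : C.length = b := hC
  by_cases hd : 2 ≤ |(a : Int) - (b : Int)|
  · rw [if_pos hd, if_pos hd]
  · have habs := abs_lt.mp (lt_of_not_ge hd)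
    rw [if_neg hd, if_neg hd]
    by_cases h2 : (a : Int) > (b : Int)
    · rw [if_pos h2, if_pos h2]
      have hab : a = b + 1 := by omega
      rw [PySem.List.slice_from_one, show ((a : Int) - 1).toNat = C.length by omega,
        altLoop_tail C V (by omega)]
    · rw [if_neg h2, if_neg h2]
      by_cases h3 : (b : Int) > (a : Int)
      · rw [if_pos h3, if_pos h3]
        have hab : b = a + 1 := by omega
        rw [PySem.List.slice_from_one, show ((b : Int) - 1).toNat = V.length by omega,
          altLoop_tail V C (by omega)]
      · rw [if_neg h3, if_neg h3]
        have hab : a = b := by omega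
        by_cases h4 : PySem.List.pyGetD C 0 ' ' < PySem.List.pyGetD V 0 ' '
        · rw [if_pos h4, if_pos h4, show ((a : Int) - 0).toNat = C.length by omega,
            altLoop_even C V (by omega)]
        · rw [if_neg h4, if_neg h4, show ((b : Int) - 0).toNat = V.length by omega,
            altLoop_even V C (by omega)]
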